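-- pv_equiv track=rewrite | github.com/brettlee-kyros/kyros-saas-poc2 | apps/dash-app-clv/utils/dbx_queries.py | generate_grouping_sets
-- ===== SOURCE A (Python) =====
-- from itertools import chain, combinations
--
-- def generate_grouping_sets(dimensions, full_path):
--     """Generate all non-empty subsets of dimensions."""
--     if not dimensions:  # If dimensions list is empty
--         return ""
--     try:
--         subsets = chain.from_iterable(
--             combinations(dimensions, r) for r in range(1, len(dimensions) + 1)
--         )
--
--         return ", ".join(f"({', '.join(subset)})" for subset in subsets)
--
--     except Exception as e:
--         raise type(e)(
--             f"Failed to constrcut subset of manual dimensions: {str(e)}"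
--         ) from e
-- ===== SOURCE B (Python) =====
-- def generate_grouping_sets(dimensions, full_path):
--     """Generate all non-empty subsets of dimensions."""
--     def pick(r, items):
--         # size-r combinations as already ", "-joined strings: choose the first
--         # element by its start position, recurse on the suffix after it
--         if r == 1:
--             return list(items)
--         out = []
--         for i in range(len(items)):
--             for tail in pick(r - 1, items[i + 1:]):
--                 out.append(items[i] + ", " + tail)
--         return out
--
--     pieces = []
--     for r in range(1, len(dimensions) + 1):
--         for body in pick(r, dimensions):
--             pieces.append("(" + body + ")")
--     return ", ".join(pieces)
-- ===== Notes on version B (the rewrite author's own statement) =====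
-- stated objective: alternative
-- what changed: B replaces itertools per-size combinations + per-subset join by a start-position recursion that builds each subset's ', '-joined body string directly while choosing suffix start indices, accumulating the wrapped pieces in an explicit loop; the empty guard and try/except disappear because B's algorithm never needs them on string inputs.
import Mathlib
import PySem

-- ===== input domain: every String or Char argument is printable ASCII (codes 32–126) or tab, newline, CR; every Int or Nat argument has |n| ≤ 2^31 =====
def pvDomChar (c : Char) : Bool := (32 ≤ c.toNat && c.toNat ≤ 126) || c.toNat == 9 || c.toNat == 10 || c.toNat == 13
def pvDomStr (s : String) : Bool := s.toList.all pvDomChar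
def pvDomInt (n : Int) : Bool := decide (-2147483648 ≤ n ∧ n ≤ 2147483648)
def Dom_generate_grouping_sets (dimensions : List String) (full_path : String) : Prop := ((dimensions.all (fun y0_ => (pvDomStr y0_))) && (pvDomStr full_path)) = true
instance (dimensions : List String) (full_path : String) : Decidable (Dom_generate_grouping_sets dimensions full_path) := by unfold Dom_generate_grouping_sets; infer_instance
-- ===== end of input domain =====

-- B replaces itertools per-size combinations + per-subset join by a start-position
-- recursion that builds each subset's ", "-joined body string directly; return
-- values agree on all inputs (on Dom all dimensions are strings, so A's
-- try/except never fires).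

-- ===== PORT A =====
-- itertools.combinations(xs, r), index-lexicographic order (standard recursive definition)
def pvCombs : Nat → List String → List (List String)
  | 0, _ => [[]]
  | _ + 1, [] => []
  | r + 1, x :: xs => (pvCombs r xs).map (fun s => x :: s) ++ pvCombs (r + 1) xs

def generate_grouping_sets (dimensions : List String) (full_path : String) : String :=
  if dimensions = [] then ""
  else
    -- chain.from_iterable(combinations(dimensions, r) for r in range(1, len+1))
    let subsets := (PySem.List.pyRange 1 ((dimensions.length : Int) + 1) 1).flatMap
      (fun r => pvCombs r.toNat dimensions)
    PySem.Str.join ", " (subsets.map (fun s => "(" ++ PySem.Str.join ", " s ++ ")"))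

-- ===== PORT B =====
-- pick(r, items) from Source B: r == 1 returns the items themselves; otherwise an
-- explicit append loop over start positions i, recursing on the suffix after i
-- (pick is only ever called with r ≥ 1; the 0 case is unreachable)
def pvPick : Nat → List String → List String
  | 0, _ => []
  | 1, items => items
  | r + 2, items =>
      (List.range items.length).foldl (fun out i =>
        out ++ (pvPick (r + 1) (items.drop (i + 1))).map
          (fun tail => items.getD i "" ++ ", " ++ tail)) []

def generate_grouping_sets_alt (dimensions : List String) (full_path : String) : String :=
  let pieces := (PySem.List.pyRange 1 ((dimensions.length : Int) + 1) 1).foldl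
    (fun acc r => (pvPick r.toNat dimensions).foldl
      (fun acc2 body => acc2 ++ ["(" ++ body ++ ")"]) acc) []
  PySem.Str.join ", " pieces

-- ===== PRECONDITION & SPEC =====
def Spec_generate_grouping_sets (dimensions : List String) (full_path : String) (out : String) : Prop := out = generate_grouping_sets_alt dimensions full_path
instance (dimensions : List String) (full_path : String) (out : String) : Decidable (Spec_generate_grouping_sets dimensions full_path out) := by unfold Spec_generate_grouping_sets; infer_instance

-- ===== CLAIM (what is proved, stated in full; the proofs are below) =====
def Claim_equal_generate_grouping_sets : Prop := ∀ (dimensions : List String) (full_path : String), Dom_generate_grouping_sets dimensions full_path → Spec_generate_grouping_sets dimensions full_path (generate_grouping_sets dimensions full_path)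

-- ===== LEMMAS AND PROOFS =====

-- every size-r combination has length r
theorem pvCombs_length (xs : List String) : ∀ r, ∀ s ∈ pvCombs r xs, s.length = r := by
  induction xs with
  | nil => intro r s hs; cases r <;> simp [pvCombs] at hs <;> simp [hs]
  | cons x xs ih =>
    intro r s hs
    cases r with
    | zero => simp [pvCombs] at hs; simp [hs]
    | succ r =>
      simp only [pvCombs, List.mem_append, List.mem_map] at hs
      rcases hs with ⟨t, ht, rfl⟩ | hs
      · simp [ih r t ht]
      · exact ih (r + 1) s hs

-- join of a nonempty cons splits off the head
theorem join_cons_ne (x : String) (s : List String) (hs : s ≠ []) :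
    PySem.Str.join ", " (x :: s) = x ++ ", " ++ PySem.Str.join ", " s := by
  cases s with
  | nil => exact absurd rfl hs
  | cons y t =>
    simp only [PySem.Str.join, List.map_cons, PySem.Chars.join_cons_cons]
    first
      | (rw [← String.toList_inj]; simp)
      | (apply String.toList_injective; simp)
      | simp [String.ofList_append]
      | (rw [String.ofList_append, String.ofList_append]; simp)

-- pvPick unfolded to a flatMap, and its cons step
theorem pvPick_succ_succ (r : Nat) (items : List String) :
    pvPick (r + 2) items = (List.range items.length).flatMap (fun i =>
      (pvPick (r + 1) (items.drop (i + 1))).map (fun tail => items.getD i "" ++ ", " ++ tail)) := by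
  rw [pvPick]
  rw [PySem.List.foldl_append_eq_flatMap]
  simp

theorem pvPick_cons (r : Nat) (x : String) (xs : List String) :
    pvPick (r + 2) (x :: xs)
      = (pvPick (r + 1) xs).map (fun t => x ++ ", " ++ t) ++ pvPick (r + 2) xs := by
  rw [pvPick_succ_succ, pvPick_succ_succ]
  rw [List.length_cons, List.range_succ_eq_map]
  simp [List.flatMap_cons, List.flatMap_map]

-- the joined combinations of size r ≥ 1 are exactly pick(r, xs)
theorem pvCombs_join (xs : List String) : ∀ r,
    (pvCombs (r + 1) xs).map (fun s => PySem.Str.join ", " s) = pvPick (r + 1) xs := by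
  induction xs with
  | nil => intro r; cases r <;> simp [pvCombs, pvPick_succ_succ, pvPick]
  | cons x xs ih =>
    intro r
    cases r with
    | zero =>
      have h1 : (pvCombs 1 xs).map (fun s => PySem.Str.join ", " s) = pvPick 1 xs := ih 0
      simp only [pvCombs, List.map_append, List.map_map, List.map_cons, List.map_nil,
        Function.comp] at h1 ⊢
      rw [h1]
      simp [pvPick, PySem.Str.join, PySem.Chars.join_singleton]
    | succ r =>
      simp only [pvCombs, List.map_append, List.map_map]
      rw [pvPick_cons]
      congr 1
      · rw [← ih r, List.map_map]
        apply List.map_congr_left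
        intro s hs
        have hne : s ≠ [] := by
          intro h
          have := pvCombs_length xs (r + 1) s hs
          simp [h] at this
        simp [Function.comp, join_cons_ne x s hne]
      · exact ih (r + 1)

-- B's accumulator loop flattened
theorem alt_pieces (dimensions : List String) :
    (PySem.List.pyRange 1 ((dimensions.length : Int) + 1) 1).foldl
      (fun acc r => (pvPick r.toNat dimensions).foldl
        (fun acc2 body => acc2 ++ ["(" ++ body ++ ")"]) acc) []
    = (PySem.List.pyRange 1 ((dimensions.length : Int) + 1) 1).flatMap
        (fun r => (pvPick r.toNat dimensions).map (fun body => "(" ++ body ++ ")")) := by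
  have h : ∀ (l : List Int) (acc : List String),
      l.foldl (fun acc r => (pvPick r.toNat dimensions).foldl
        (fun acc2 body => acc2 ++ ["(" ++ body ++ ")"]) acc) acc
      = acc ++ l.flatMap (fun r => (pvPick r.toNat dimensions).map (fun body => "(" ++ body ++ ")")) := by
    intro l
    induction l with
    | nil => simp
    | cons r l ihl =>
      intro acc
      rw [List.foldl_cons, ihl, PySem.List.foldl_append_singleton_eq_map]
      simp
  simpa using h _ []

-- ===== VERDICT (by name: the statement is the Claim_ definition above) =====
theorem generate_grouping_sets_spec : Claim_equal_generate_grouping_sets := by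
  intro dimensions full_path _
  unfold Spec_generate_grouping_sets generate_grouping_sets generate_grouping_sets_alt
  dsimp only
  rw [alt_pieces]
  by_cases hd : dimensions = []
  · subst hd
    simp [PySem.List.pyRange_one_eq_nil, PySem.Str.join, PySem.Chars.join_nil]
  · rw [if_neg hd]
    rw [List.map_flatMap]
    congr 1
    apply List.flatMap_congr
    intro r hr
    rw [PySem.List.mem_pyRange_one] at hr
    obtain ⟨k, hk⟩ : ∃ k : Nat, r.toNat = k + 1 := ⟨r.toNat - 1, by omega⟩
    rw [hk, ← pvCombs_join dimensions k, List.map_map]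
    rfl
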